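-- pv_equiv track=rewrite | github.com/Lukkk01/Goa-homeworks | Level 112/Homework/task3.py | get_consective_items
-- ===== SOURCE A (Python) =====
-- def get_consective_items(items, key):
--     items = str(items)
--     key = str(key)
--
--     max_count = 0
--     current_count = 0
--
--     for ch in items:
--         if ch == key:
--             current_count += 1
--             max_count = max(max_count, current_count)
--         else:
--             current_count = 0
--
--     return max_count
-- ===== SOURCE B (Python) =====
-- def get_consective_items(items, key):
--     items = str(items)
--     key = str(key)
--     best = 0
--     i = 0
--     n = len(items)
--     while i < n:
--         j = i + 1
--         while j < n and items[j] == items[i]: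
--             j += 1
--         run = j - i
--         if items[i] == key and run > best:
--             best = run
--         i = j
--     return best
-- ===== Notes on version B (the rewrite author's own statement) =====
-- stated objective: alternative
-- what changed: B splits the string into maximal runs of identical characters (a hand-rolled groupby) and keeps the longest run whose character equals the key, instead of A's per-character running counter with a max update at every step.
import Mathlib
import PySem

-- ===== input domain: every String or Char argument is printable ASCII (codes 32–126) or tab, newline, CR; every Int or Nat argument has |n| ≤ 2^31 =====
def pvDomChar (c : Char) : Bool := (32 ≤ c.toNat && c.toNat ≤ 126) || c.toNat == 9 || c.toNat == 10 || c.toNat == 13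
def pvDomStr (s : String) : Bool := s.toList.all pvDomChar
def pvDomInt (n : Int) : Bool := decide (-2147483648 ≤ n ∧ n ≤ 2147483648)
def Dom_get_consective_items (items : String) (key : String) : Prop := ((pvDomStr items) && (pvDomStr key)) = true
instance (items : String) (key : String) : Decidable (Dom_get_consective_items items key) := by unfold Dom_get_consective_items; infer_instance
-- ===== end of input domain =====

-- B rebuilds the answer from maximal runs of identical characters (a hand-rolled groupby)
-- instead of A's per-character running counter; objective: alternative decomposition, same cost.

-- ===== PORT A =====
-- per-character loop carrying (max_count, current_count); 'ch == key' is Python's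
-- string comparison of the one-char string ch with key
def get_consective_items (items : String) (key : String) : Int :=
  (items.toList.foldl
    (fun p ch =>
      if String.singleton ch == key then
        (max p.1 (p.2 + 1), p.2 + 1)
      else
        (p.1, 0))
    ((0 : Int), (0 : Int))).1

-- ===== PORT B =====
-- outer loop over maximal runs: the inner 'while j < n and items[j] == items[i]'
-- is the takeWhile/dropWhile split of the tail at the run character
def altGo (key : String) (l : List Char) (best : Int) : Int :=
  match l with
  | [] => best
  | c :: xs =>
    let run : Int := 1 + (xs.takeWhile (· == c)).length
    let best' := if String.singleton c == key ∧ run > best then run else best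
    altGo key (xs.dropWhile (· == c)) best'
termination_by l.length
decreasing_by
  simp only [List.length_cons]
  exact Nat.lt_succ_of_le (List.length_dropWhile_le _ _)

def get_consective_items_alt (items : String) (key : String) : Int :=
  altGo key items.toList 0

-- ===== PRECONDITION & SPEC =====
def Spec_get_consective_items (items : String) (key : String) (out : Int) : Prop := out = get_consective_items_alt items key
instance (items : String) (key : String) (out : Int) : Decidable (Spec_get_consective_items items key out) := by unfold Spec_get_consective_items; infer_instance

-- ===== CLAIM (what is proved, stated in full; the proofs are below) =====
def Claim_equal_get_consective_items : Prop := ∀ (items : String) (key : String), Dom_get_consective_items items key → Spec_get_consective_items items key (get_consective_items items key)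

-- ===== LEMMAS AND PROOFS =====

-- reference function: best run ending credit 'cnt' carried into the list
def gRef (key : String) : List Char → Int → Int
  | [], _ => 0
  | x :: xs, cnt =>
    if String.singleton x == key then max (cnt + 1) (gRef key xs (cnt + 1))
    else gRef key xs 0

theorem singleton_eq_iff (a b : Char) : (String.singleton a == key) = true → (String.singleton b == key) = true → a = b := by
  intro ha hb
  have ha' := beq_iff_eq.mp ha
  have hb' := beq_iff_eq.mp hb
  have : String.singleton a = String.singleton b := ha'.trans hb'.symm
  simpa [String.singleton, String.ext_iff] using this

theorem foldl_eq_gRef (key : String) (l : List Char) (m cnt : Int) (hm : 0 ≤ m) :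
    (l.foldl
      (fun p ch =>
        if String.singleton ch == key then
          (max p.1 (p.2 + 1), p.2 + 1)
        else
          (p.1, 0))
      (m, cnt)).1 = max m (gRef key l cnt) := by
  induction l generalizing m cnt with
  | nil => simp [gRef]; omega
  | cons x xs ih =>
    by_cases h : (String.singleton x == key) = true
    · simp only [List.foldl_cons, h, if_pos, gRef]
      rw [ih (max m (cnt + 1)) (cnt + 1) (by omega)]
      omega
    · simp only [List.foldl_cons, gRef, h, if_neg, Bool.false_eq_true, not_false_iff]
      exact ih m 0 hm

theorem gRef_run_true (key : String) (c : Char) (h : (String.singleton c == key) = true)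
    (xs : List Char) (cnt : Int) :
    gRef key (c :: xs) cnt =
      max (cnt + 1 + (xs.takeWhile (· == c)).length) (gRef key (xs.dropWhile (· == c)) 0) := by
  induction xs generalizing cnt with
  | nil => simp [gRef, h]
  | cons y ys ih =>
    by_cases hy : (y == c) = true
    · have hyc : y = c := beq_iff_eq.mp hy
      subst hyc
      have hih := ih (cnt + 1)
      simp only [gRef, h, if_pos] at hih
      simp only [gRef, h, if_pos, List.takeWhile, List.dropWhile, BEq.refl, List.length_cons]
      rw [hih]
      push_cast
      omega
    · have hyk : ¬ (String.singleton y == key) = true := by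
        intro hk; exact hy (by rw [singleton_eq_iff y c hk h]; exact BEq.refl c)
      simp only [gRef, h, if_pos, List.takeWhile, List.dropWhile, hy, if_neg, Bool.false_eq_true,
        not_false_iff, List.length_nil, hyk]
      omega

theorem gRef_run_false (key : String) (c : Char) (h : ¬ (String.singleton c == key) = true)
    (xs : List Char) (cnt : Int) :
    gRef key (c :: xs) cnt = gRef key (xs.dropWhile (· == c)) 0 := by
  induction xs generalizing cnt with
  | nil => simp [gRef, h]
  | cons y ys ih =>
    by_cases hy : (y == c) = true
    · have hyc : y = c := beq_iff_eq.mp hy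
      subst hyc
      simp only [gRef, h, if_neg, Bool.false_eq_true, not_false_iff,
        List.dropWhile, BEq.refl]
      have := ih 0
      simpa [gRef, h] using this
    · simp [gRef, h, List.dropWhile, hy]

theorem altGo_eq (key : String) : ∀ (n : Nat) (l : List Char), l.length ≤ n →
    ∀ (best : Int), 0 ≤ best → altGo key l best = max best (gRef key l 0) := by
  intro n
  induction n with
  | zero =>
    intro l hl best hb
    have : l = [] := List.eq_nil_of_length_eq_zero (Nat.le_zero.mp hl)
    subst this
    simp [altGo, gRef]; omega
  | succ n ihn =>
    intro l hl best hb
    match l with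
    | [] => simp [altGo, gRef]; omega
    | c :: xs =>
      rw [altGo]
      have hlen : (xs.dropWhile (· == c)).length ≤ n := by
        have h1 := List.length_dropWhile_le (· == c) xs
        simp only [List.length_cons] at hl
        omega
      by_cases h : (String.singleton c == key) = true
      · rw [gRef_run_true key c h xs 0]
        set run : Int := 1 + (xs.takeWhile (· == c)).length with hrun
        by_cases hgt : run > best
        · rw [if_pos ⟨h, hgt⟩, ihn _ hlen run (by positivity)]
          omega
        · rw [if_neg (by tauto), ihn _ hlen best hb]
          omega
      · rw [gRef_run_false key c h xs 0, if_neg (by tauto), ihn _ hlen best hb]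

-- ===== VERDICT (by name: the statement is the Claim_ definition above) =====
theorem get_consective_items_spec : Claim_equal_get_consective_items := by
  intro items key _
  show _ = _
  rw [get_consective_items, get_consective_items_alt,
    foldl_eq_gRef key items.toList 0 0 le_rfl,
    altGo_eq key items.toList.length items.toList le_rfl 0 le_rfl]
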